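-- pv_equiv track=rewrite | github.com/scimarin/fromthetransistor | 3-processor/ARM/assembler/asm.py | encode_data_processing_shifter
-- ===== SOURCE A (Python) =====
-- REGISTERS = {
--     'r0':  0b0000, 'r1':  0b0001, 'r2':  0b0010, 'r3':  0b0011,
--     'r4':  0b0100, 'r5':  0b0101, 'r6':  0b0110, 'r7':  0b0111,
--     'r8':  0b1000, 'r9':  0b1001, 'r10': 0b1010, 'r11': 0b1011,
--     'r12': 0b1100, 'r13': 0b1101, 'r14': 0b1110, 'r15': 0b1111,
-- }
--
-- def encode_data_processing_shifter(shifter):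
--     encoding = 0
--     shifter_operand = 0b00
--     I = 0b00
--
--     tokens = [i.strip() for i in shifter.split(',')]
--     if len(tokens) == 1:
--         if tokens[0][0] == '#': # immediate
--             I = 0b01
--             shifter_operand |= int(tokens[0][1:])
--         elif tokens[0][0] == 'r': # register
--             shifter_operand |= REGISTERS[tokens[0]]
--     elif len(tokens) == 2:
--         Rm = REGISTERS[tokens[0]]
--
--         move = tokens[1].split()
--         if move[0] == 'LSL':
--             if move[1][0] == '#': # immediate
--                 shift_imm = int(move[1][1:])
--                 shifter_operand |= shift_imm << 7
--                 shifter_operand |= Rm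
--             else:
--                 Rs = REGISTERS[move[1]]
--                 shifter_operand |= Rs << 8
--                 shifter_operand |= 1 << 4
--                 shifter_operand |= Rm
--         elif move[0] == 'LSR':
--             if move[1][0] == '#': # immediate
--                 shift_imm = int(move[1][1:])
--                 shifter_operand |= shift_imm << 7
--                 shifter_operand |= 1 << 5
--                 shifter_operand |= Rm
--             else:
--                 Rs = REGISTERS[move[1]]
--                 shifter_operand |= Rs << 8
--                 shifter_operand |= 1 << 5
--                 shifter_operand |= 1 << 4
--                 shifter_operand |= Rm
--         elif move[0] == 'ASR':
--             if move[1][0] == '#': # immediate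
--                 shift_imm = int(move[1][1:])
--                 shifter_operand |= shift_imm << 7
--                 shifter_operand |= 1 << 6
--                 shifter_operand |= Rm
--             else:
--                 Rs = REGISTERS[move[1]]
--                 shifter_operand |= Rs << 8
--                 shifter_operand |= 1 << 6
--                 shifter_operand |= 1 << 4
--                 shifter_operand |= Rm
--         elif move[0] == 'ROR':
--             if move[1][0] == '#': # immediate
--                 shift_imm = int(move[1][1:])
--                 shifter_operand |= shift_imm << 7
--                 shifter_operand |= 1 << 6
--                 shifter_operand |= 1 << 5
--                 shifter_operand |= Rm
--             else:
--                 Rs = REGISTERS[move[1]]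
--                 shifter_operand |= Rs << 8
--                 shifter_operand |= 1 << 6
--                 shifter_operand |= 1 << 5
--                 shifter_operand |= 1 << 4
--                 shifter_operand |= Rm
--         elif move[0] == 'RRX':
--             shifter_operand |= 1 << 6
--             shifter_operand |= 1 << 5
--             shifter_operand |= Rm
--     else:
--         raise Exception('Invalid arguments: {}'.format(args))
--
--     encoding |= I << 25
--     encoding |= shifter_operand
--
--     return encoding
-- ===== SOURCE B (Python) =====
-- REGISTERS = {
--     'r0':  0b0000, 'r1':  0b0001, 'r2':  0b0010, 'r3':  0b0011,
--     'r4':  0b0100, 'r5':  0b0101, 'r6':  0b0110, 'r7':  0b0111,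
--     'r8':  0b1000, 'r9':  0b1001, 'r10': 0b1010, 'r11': 0b1011,
--     'r12': 0b1100, 'r13': 0b1101, 'r14': 0b1110, 'r15': 0b1111,
-- }
--
-- _SHIFT_TY = {'LSL': 0, 'LSR': 1, 'ASR': 2, 'ROR': 3}
--
-- # declarative field layout: for each operand form, which named field goes at which bit position
-- _LAYOUT = {
--     'imm':       [('I', 25), ('val', 0)],
--     'reg':       [('Rm', 0)],
--     'shift_imm': [('val', 7), ('ty', 5), ('Rm', 0)],
--     'shift_reg': [('Rs', 8), ('ty', 5), ('one', 4), ('Rm', 0)],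
--     'rrx':       [('ty', 5), ('Rm', 0)],
--     'zero':      [],
-- }
--
-- def _parse(shifter):
--     """Stage 1: parse the shifter into (form, named fields)."""
--     tokens = [t.strip() for t in shifter.split(',')]
--     if len(tokens) == 1:
--         t = tokens[0]
--         if t[0] == '#':
--             return 'imm', {'I': 1, 'val': int(t[1:])}
--         if t[0] == 'r':
--             return 'reg', {'Rm': REGISTERS[t]}
--         return 'zero', {}
--     if len(tokens) == 2:
--         rm = REGISTERS[tokens[0]]
--         move = tokens[1].split()
--         op = move[0]
--         if op == 'RRX':
--             return 'rrx', {'ty': 3, 'Rm': rm}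
--         if op not in _SHIFT_TY:
--             return 'zero', {}
--         ty = _SHIFT_TY[op]
--         arg = move[1]
--         if arg[0] == '#':
--             return 'shift_imm', {'val': int(arg[1:]), 'ty': ty, 'Rm': rm}
--         return 'shift_reg', {'Rs': REGISTERS[arg], 'ty': ty, 'one': 1, 'Rm': rm}
--     raise Exception('Invalid arguments: {}'.format(shifter))
--
-- def encode_data_processing_shifter(shifter):
--     """Stage 2: pack the parsed fields according to the layout table."""
--     form, fields = _parse(shifter)
--     encoding = 0
--     for name, pos in _LAYOUT[form]:
--         encoding |= fields[name] << pos
--     return encoding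
-- ===== Notes on version B (the rewrite author's own statement) =====
-- stated objective: alternative
-- what changed: Split the single accumulate-as-you-parse function into two staged passes: a parser that produces an abstract (form, named-fields) representation, and a separate table-driven packer that folds a declarative per-form field-layout table (_LAYOUT) into the encoding, instead of A's inline per-branch bit accumulation.
import Mathlib
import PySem

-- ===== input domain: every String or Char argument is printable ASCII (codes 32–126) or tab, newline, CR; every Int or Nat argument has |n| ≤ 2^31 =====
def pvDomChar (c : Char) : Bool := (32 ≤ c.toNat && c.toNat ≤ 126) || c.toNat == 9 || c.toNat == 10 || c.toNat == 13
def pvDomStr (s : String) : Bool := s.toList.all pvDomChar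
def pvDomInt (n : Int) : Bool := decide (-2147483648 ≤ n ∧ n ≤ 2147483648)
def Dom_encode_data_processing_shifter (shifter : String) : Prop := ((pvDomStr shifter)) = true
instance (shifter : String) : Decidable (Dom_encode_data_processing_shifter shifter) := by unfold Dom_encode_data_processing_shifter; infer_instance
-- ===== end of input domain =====

-- B splits A's accumulate-as-you-parse function into two staged passes — a parser producing an
-- abstract (form, named-fields) value and a table-driven packer folding a declarative field-layout
-- table — instead of A's inline per-branch bit accumulation (objective: alternative; not faster).

-- ===== PORT A =====
def REGISTERS : PySem.Dict String Int := PySem.Dict.ofList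
  [("r0", 0), ("r1", 1), ("r2", 2), ("r3", 3),
   ("r4", 4), ("r5", 5), ("r6", 6), ("r7", 7),
   ("r8", 8), ("r9", 9), ("r10", 10), ("r11", 11),
   ("r12", 12), ("r13", 13), ("r14", 14), ("r15", 15)]

-- iso = (I, shifter_operand); none marks the points where the Python raises
def encode_data_processing_shifter (shifter : String) : Int :=
  let tokens := ((PySem.Str.split? shifter ",").getD []).map PySem.Str.strip
  let iso : Option (Int × Int) :=
    if tokens.length == 1 then
      match (tokens.getD 0 "").toList with
      | [] => none            -- IndexError on tokens[0][0]
      | c :: rest =>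
        if c == '#' then      -- immediate
          match PySem.Int.ofChars? rest with
          | none => none      -- ValueError from int()
          | some v => some (1, PySem.Int.bor 0 v)
        else if c == 'r' then -- register
          match REGISTERS.get? (tokens.getD 0 "") with
          | none => none      -- KeyError
          | some r => some (0, PySem.Int.bor 0 r)
        else some (0, 0)
    else if tokens.length == 2 then
      match REGISTERS.get? (tokens.getD 0 "") with
      | none => none          -- KeyError
      | some Rm =>
        let move := PySem.Str.split₀ (tokens.getD 1 "")
        match move with
        | [] => none          -- IndexError on move[0]
        | m0 :: mrest =>
          if m0 == "LSL" then
            match mrest with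
            | [] => none      -- IndexError on move[1]
            | m1 :: _ =>
              match m1.toList with
              | [] => none
              | hc :: hrest =>
                if hc == '#' then
                  match PySem.Int.ofChars? hrest with
                  | none => none
                  | some si => some (0, PySem.Int.bor (PySem.Int.bor 0 (si <<< (7 : Nat))) Rm)
                else
                  match REGISTERS.get? m1 with
                  | none => none
                  | some Rs => some (0, PySem.Int.bor (PySem.Int.bor (PySem.Int.bor 0 (Rs <<< (8 : Nat))) ((1 : Int) <<< (4 : Nat))) Rm)
          else if m0 == "LSR" then
            match mrest with
            | [] => none
            | m1 :: _ =>
              match m1.toList with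
              | [] => none
              | hc :: hrest =>
                if hc == '#' then
                  match PySem.Int.ofChars? hrest with
                  | none => none
                  | some si => some (0, PySem.Int.bor (PySem.Int.bor (PySem.Int.bor 0 (si <<< (7 : Nat))) ((1 : Int) <<< (5 : Nat))) Rm)
                else
                  match REGISTERS.get? m1 with
                  | none => none
                  | some Rs => some (0, PySem.Int.bor (PySem.Int.bor (PySem.Int.bor (PySem.Int.bor 0 (Rs <<< (8 : Nat))) ((1 : Int) <<< (5 : Nat))) ((1 : Int) <<< (4 : Nat))) Rm)
          else if m0 == "ASR" then
            match mrest with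
            | [] => none
            | m1 :: _ =>
              match m1.toList with
              | [] => none
              | hc :: hrest =>
                if hc == '#' then
                  match PySem.Int.ofChars? hrest with
                  | none => none
                  | some si => some (0, PySem.Int.bor (PySem.Int.bor (PySem.Int.bor 0 (si <<< (7 : Nat))) ((1 : Int) <<< (6 : Nat))) Rm)
                else
                  match REGISTERS.get? m1 with
                  | none => none
                  | some Rs => some (0, PySem.Int.bor (PySem.Int.bor (PySem.Int.bor (PySem.Int.bor 0 (Rs <<< (8 : Nat))) ((1 : Int) <<< (6 : Nat))) ((1 : Int) <<< (4 : Nat))) Rm)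
          else if m0 == "ROR" then
            match mrest with
            | [] => none
            | m1 :: _ =>
              match m1.toList with
              | [] => none
              | hc :: hrest =>
                if hc == '#' then
                  match PySem.Int.ofChars? hrest with
                  | none => none
                  | some si => some (0, PySem.Int.bor (PySem.Int.bor (PySem.Int.bor (PySem.Int.bor 0 (si <<< (7 : Nat))) ((1 : Int) <<< (6 : Nat))) ((1 : Int) <<< (5 : Nat))) Rm)
                else
                  match REGISTERS.get? m1 with
                  | none => none
                  | some Rs => some (0, PySem.Int.bor (PySem.Int.bor (PySem.Int.bor (PySem.Int.bor (PySem.Int.bor 0 (Rs <<< (8 : Nat))) ((1 : Int) <<< (6 : Nat))) ((1 : Int) <<< (5 : Nat))) ((1 : Int) <<< (4 : Nat))) Rm)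
          else if m0 == "RRX" then
            some (0, PySem.Int.bor (PySem.Int.bor (PySem.Int.bor 0 ((1 : Int) <<< (6 : Nat))) ((1 : Int) <<< (5 : Nat))) Rm)
          else some (0, 0)
    else none                 -- 'raise Exception(... args)' (NameError: args undefined)
  match iso with
  | none => 0
  | some (I, so) => PySem.Int.bor (PySem.Int.bor 0 (I <<< (25 : Nat))) so

-- ===== PORT B =====
def SHIFT_TY : PySem.Dict String Int := PySem.Dict.ofList
  [("LSL", 0), ("LSR", 1), ("ASR", 2), ("ROR", 3)]

-- declarative field layout: for each operand form, which named field goes at which bit position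
def LAYOUT : PySem.Dict String (List (String × Nat)) := PySem.Dict.ofList
  [("imm", [("I", 25), ("val", 0)]),
   ("reg", [("Rm", 0)]),
   ("shift_imm", [("val", 7), ("ty", 5), ("Rm", 0)]),
   ("shift_reg", [("Rs", 8), ("ty", 5), ("one", 4), ("Rm", 0)]),
   ("rrx", [("ty", 5), ("Rm", 0)]),
   ("zero", [])]

-- stage 1: parse the shifter into (form, named fields); none marks where the Python raises
def pvParse (shifter : String) : Option (String × PySem.Dict String Int) :=
  let tokens := ((PySem.Str.split? shifter ",").getD []).map PySem.Str.strip
  if tokens.length == 1 then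
    let t := tokens.getD 0 ""
    match t.toList with
    | [] => none              -- IndexError
    | c :: rest =>
      if c == '#' then
        match PySem.Int.ofChars? rest with
        | none => none        -- ValueError
        | some v => some ("imm", PySem.Dict.ofList [("I", 1), ("val", v)])
      else if c == 'r' then
        match REGISTERS.get? t with
        | none => none        -- KeyError
        | some r => some ("reg", PySem.Dict.ofList [("Rm", r)])
      else some ("zero", PySem.Dict.ofList [])
  else if tokens.length == 2 then
    match REGISTERS.get? (tokens.getD 0 "") with
    | none => none            -- KeyError
    | some rm =>
      match PySem.Str.split₀ (tokens.getD 1 "") with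
      | [] => none            -- IndexError
      | op :: rest =>
        if op == "RRX" then some ("rrx", PySem.Dict.ofList [("ty", 3), ("Rm", rm)])
        else
          match SHIFT_TY.get? op with
          | none => some ("zero", PySem.Dict.ofList [])
          | some ty =>
            match rest with
            | [] => none      -- IndexError
            | arg :: _ =>
              match arg.toList with
              | [] => none
              | hc :: hrest =>
                if hc == '#' then
                  match PySem.Int.ofChars? hrest with
                  | none => none  -- ValueError
                  | some si => some ("shift_imm", PySem.Dict.ofList [("val", si), ("ty", ty), ("Rm", rm)])
                else
                  match REGISTERS.get? arg with
                  | none => none  -- KeyError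
                  | some rs => some ("shift_reg", PySem.Dict.ofList [("Rs", rs), ("ty", ty), ("one", 1), ("Rm", rm)])
  else none                   -- raise

-- stage 2: pack the parsed fields according to the layout table
def encode_data_processing_shifter_alt (shifter : String) : Int :=
  match pvParse shifter with
  | none => 0                 -- where the Python raises; excluded by Pre_
  | some (form, fields) =>
    ((LAYOUT.get? form).getD []).foldl
      (fun enc np => PySem.Int.bor enc (((fields.get? np.1).getD 0) <<< np.2)) 0

-- ===== PRECONDITION & SPEC =====
-- Pre_ excludes exactly the inputs where the Python A raises: an empty/whitespace operand
-- token (IndexError), a non-register where a register name is looked up (KeyError), a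
-- non-integer after '#' (ValueError from int()), a shift mnemonic with no argument
-- (IndexError), and three or more comma-separated tokens (NameError in the raise line).
def pvP1 (t : String) : Prop :=
  t ≠ "" ∧
  (t.toList.headD ' ' = '#' → (PySem.Int.ofChars? t.toList.tail).isSome = true) ∧
  (t.toList.headD ' ' ≠ '#' → t.toList.headD ' ' = 'r' → (REGISTERS.get? t).isSome = true)

def pvP2 (t0 t1 : String) : Prop :=
  (REGISTERS.get? t0).isSome = true ∧
  (let move := PySem.Str.split₀ t1
   move ≠ [] ∧
   (move.getD 0 "" ∈ (["LSL", "LSR", "ASR", "ROR"] : List String) →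
     2 ≤ move.length ∧
     (let m1 := move.getD 1 ""
      if m1.toList.headD ' ' = '#' then (PySem.Int.ofChars? m1.toList.tail).isSome = true
      else (REGISTERS.get? m1).isSome = true)))

def Pre_encode_data_processing_shifter (shifter : String) : Prop :=
  let tokens := ((PySem.Str.split? shifter ",").getD []).map PySem.Str.strip
  (tokens.length = 1 ∨ tokens.length = 2) ∧
  (tokens.length = 1 → pvP1 (tokens.getD 0 "")) ∧
  (tokens.length = 2 → pvP2 (tokens.getD 0 "") (tokens.getD 1 ""))

instance (shifter : String) : Decidable (Pre_encode_data_processing_shifter shifter) := by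
  unfold Pre_encode_data_processing_shifter pvP1 pvP2; infer_instance

def pvWitness_encode_data_processing_shifter : String := "r1, LSL #2"

def Spec_encode_data_processing_shifter (shifter : String) (out : Int) : Prop := out = encode_data_processing_shifter_alt shifter
instance (shifter : String) (out : Int) : Decidable (Spec_encode_data_processing_shifter shifter out) := by unfold Spec_encode_data_processing_shifter; infer_instance

-- ===== CLAIM (what is proved, stated in full; the proofs are below) =====
def Claim_equal_encode_data_processing_shifter : Prop := ∀ (shifter : String), Dom_encode_data_processing_shifter shifter → Pre_encode_data_processing_shifter shifter → Spec_encode_data_processing_shifter shifter (encode_data_processing_shifter shifter)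

-- ===== LEMMAS AND PROOFS =====

theorem pv_zero_bor (x : Int) : PySem.Int.bor 0 x = x := by
  rw [PySem.Int.bor_comm]; simp


theorem pv_nat_bit (k y : Nat) : y &&& 2 ^ k = 2 ^ k * (y / 2 ^ k % 2) := by
  rw [Nat.and_two_pow]
  rcases h : y.testBit k <;> rw [Nat.testBit_eq_decide_div_mod_eq] at h <;> simp at h
  · have h0 : y / 2 ^ k % 2 = 0 := by omega
    rw [h0]; simp
  · rw [h]; simp

theorem pv_and64 (y : Nat) : y &&& 64 = 64 * (y / 64 % 2) := by
  have h := pv_nat_bit 6 y; norm_num at h; exact h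

theorem pv_and32 (y : Nat) : y &&& 32 = 32 * (y / 32 % 2) := by
  have h := pv_nat_bit 5 y; norm_num at h; exact h

theorem pv_and96 (y : Nat) : y &&& 96 = 64 * (y / 64 % 2) + 32 * (y / 32 % 2) := by
  rw [show (96 : Nat) = 64 ||| 32 from by decide, Nat.and_or_distrib_left, pv_and64, pv_and32]
  have h64 : y / 64 % 2 = 0 ∨ y / 64 % 2 = 1 := by omega
  have h32 : y / 32 % 2 = 0 ∨ y / 32 % 2 = 1 := by omega
  rcases h64 with h64 | h64 <;> rcases h32 with h32 | h32 <;> rw [h64, h32] <;> decide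

theorem pv_nat_key (m : Nat) :
    (m - (m &&& 64)) - ((m - (m &&& 64)) &&& 32) = m - (m &&& 96) := by
  rw [pv_and96, pv_and64, pv_and32]; omega

theorem pv_bor_negSucc (m b : Nat) :
    PySem.Int.bor (Int.negSucc m) (b : Int) = Int.negSucc (m - (m &&& b)) := by
  unfold PySem.Int.bor
  have hns : ¬ (0 : Int) ≤ Int.negSucc m := by omega
  have hb : (0 : Int) ≤ (b : Int) := by positivity
  simp only [hns, if_false, hb, if_true]
  have h1 : -Int.negSucc m - 1 = (m : Int) := by omega
  rw [h1]
  simp [Int.negSucc_eq]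
  omega

-- the one real bit identity the proof needs: ORing in 64 then 32 is ORing in 96
theorem pv_bor_64_32 (x : Int) : PySem.Int.bor (PySem.Int.bor x 64) 32 = PySem.Int.bor x 96 := by
  rcases x with m | m
  · show PySem.Int.bor (PySem.Int.bor ((m : Nat) : Int) 64) 32 = PySem.Int.bor ((m : Nat) : Int) 96
    rw [show (64 : Int) = ((64 : Nat) : Int) from by norm_num,
        show (32 : Int) = ((32 : Nat) : Int) from by norm_num,
        show (96 : Int) = ((96 : Nat) : Int) from by norm_num,
        PySem.Int.bor_natCast, PySem.Int.bor_natCast, PySem.Int.bor_natCast, Nat.lor_assoc,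
        show (64 ||| 32 : Nat) = 96 from by decide]
  · rw [show (64 : Int) = ((64 : Nat) : Int) from by norm_num,
        show (32 : Int) = ((32 : Nat) : Int) from by norm_num,
        show (96 : Int) = ((96 : Nat) : Int) from by norm_num,
        pv_bor_negSucc, pv_bor_negSucc, pv_bor_negSucc, pv_nat_key]

theorem pv_c3 : ((2 : Int) <<< (5 : Nat)) = (1 : Int) <<< (6 : Nat) := by decide
theorem pv_S1 : SHIFT_TY.get? "LSL" = some 0 := by decide
theorem pv_S2 : SHIFT_TY.get? "LSR" = some 1 := by decide
theorem pv_S3 : SHIFT_TY.get? "ASR" = some 2 := by decide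
theorem pv_S4 : SHIFT_TY.get? "ROR" = some 3 := by decide

theorem pv_c4 : ((3 : Int) <<< (5 : Nat)) = 96 := by decide
theorem pv_c5 : ((1 : Int) <<< (6 : Nat)) = 64 := by decide
theorem pv_c6 : ((1 : Int) <<< (5 : Nat)) = 32 := by decide
theorem pv_c7 : PySem.Int.bor (64 : Int) 32 = 96 := by decide

theorem pv_S_none (s : String) (h1 : ¬ s = "LSL") (h2 : ¬ s = "LSR") (h3 : ¬ s = "ASR") (h4 : ¬ s = "ROR") :
    SHIFT_TY.get? s = none := by
  have hmk : SHIFT_TY = PySem.Dict.mk [("LSL", 0), ("LSR", 1), ("ASR", 2), ("ROR", 3)] := by decide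
  rw [hmk]
  rw [PySem.Dict.get?_mk_cons, if_neg (by simp only [beq_iff_eq]; exact fun h => h1 h.symm)]
  rw [PySem.Dict.get?_mk_cons, if_neg (by simp only [beq_iff_eq]; exact fun h => h2 h.symm)]
  rw [PySem.Dict.get?_mk_cons, if_neg (by simp only [beq_iff_eq]; exact fun h => h3 h.symm)]
  rw [PySem.Dict.get?_mk_cons, if_neg (by simp only [beq_iff_eq]; exact fun h => h4 h.symm)]
  rfl

-- lookup lemmas for the literal layout table and the parser's field dicts (all by computation)
theorem pv_L_imm : LAYOUT.get? "imm" = some [("I", 25), ("val", 0)] := rfl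
theorem pv_L_reg : LAYOUT.get? "reg" = some [("Rm", 0)] := rfl
theorem pv_L_si : LAYOUT.get? "shift_imm" = some [("val", 7), ("ty", 5), ("Rm", 0)] := rfl
theorem pv_L_sr : LAYOUT.get? "shift_reg" = some [("Rs", 8), ("ty", 5), ("one", 4), ("Rm", 0)] := rfl
theorem pv_L_rrx : LAYOUT.get? "rrx" = some [("ty", 5), ("Rm", 0)] := rfl
theorem pv_L_zero : LAYOUT.get? "zero" = some [] := rfl
theorem pv_F_imm_I (v : Int) : (PySem.Dict.ofList [("I", (1:Int)), ("val", v)]).get? "I" = some 1 := rfl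
theorem pv_F_imm_val (v : Int) : (PySem.Dict.ofList [("I", (1:Int)), ("val", v)]).get? "val" = some v := rfl
theorem pv_F_reg (r : Int) : (PySem.Dict.ofList [("Rm", r)]).get? "Rm" = some r := rfl
theorem pv_F_si_val (si ty rm : Int) : (PySem.Dict.ofList [("val", si), ("ty", ty), ("Rm", rm)]).get? "val" = some si := rfl
theorem pv_F_si_ty (si ty rm : Int) : (PySem.Dict.ofList [("val", si), ("ty", ty), ("Rm", rm)]).get? "ty" = some ty := rfl
theorem pv_F_si_Rm (si ty rm : Int) : (PySem.Dict.ofList [("val", si), ("ty", ty), ("Rm", rm)]).get? "Rm" = some rm := rfl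
theorem pv_F_sr_Rs (rs ty rm : Int) : (PySem.Dict.ofList [("Rs", rs), ("ty", ty), ("one", (1:Int)), ("Rm", rm)]).get? "Rs" = some rs := rfl
theorem pv_F_sr_ty (rs ty rm : Int) : (PySem.Dict.ofList [("Rs", rs), ("ty", ty), ("one", (1:Int)), ("Rm", rm)]).get? "ty" = some ty := rfl
theorem pv_F_sr_one (rs ty rm : Int) : (PySem.Dict.ofList [("Rs", rs), ("ty", ty), ("one", (1:Int)), ("Rm", rm)]).get? "one" = some 1 := rfl
theorem pv_F_sr_Rm (rs ty rm : Int) : (PySem.Dict.ofList [("Rs", rs), ("ty", ty), ("one", (1:Int)), ("Rm", rm)]).get? "Rm" = some rm := rfl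
theorem pv_F_rrx_ty (rm : Int) : (PySem.Dict.ofList [("ty", (3:Int)), ("Rm", rm)]).get? "ty" = some 3 := rfl
theorem pv_F_rrx_Rm (rm : Int) : (PySem.Dict.ofList [("ty", (3:Int)), ("Rm", rm)]).get? "Rm" = some rm := rfl
theorem pv_shl (x : Int) (k : Nat) : x <<< ((k : Nat) : Int) = x <<< k := by
  rw [Int.shiftLeft_eq_mul_pow, Int.shiftLeft_eq]; push_cast; ring

-- ===== VERDICT (by name: the statement is the Claim_ definition above) =====
theorem encode_data_processing_shifter_spec : Claim_equal_encode_data_processing_shifter := by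
  intro shifter _ hpre
  unfold Spec_encode_data_processing_shifter
  unfold Pre_encode_data_processing_shifter at hpre
  unfold encode_data_processing_shifter encode_data_processing_shifter_alt pvParse
  simp only [] at *
  generalize ((PySem.Str.split? shifter ",").getD []).map PySem.Str.strip = ts at *
  obtain ⟨hlen, h1, h2⟩ := hpre
  rcases ts with _ | ⟨t0, _ | ⟨t1, _ | ⟨t2, rest2⟩⟩⟩
  · simp at hlen
  · -- one token
    have hp1 := h1 (by simp)
    unfold pvP1 at hp1
    obtain ⟨hne, himm, hreg⟩ := hp1
    simp only [List.getD_cons_zero] at hne himm hreg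
    norm_num
    cases ht : t0.toList with
    | nil =>
      have : t0 = "" := by
        have h := congrArg String.ofList ht; simpa using h
      exact absurd this hne
    | cons c crest =>
      rw [ht] at himm hreg
      simp only [List.headD_cons, List.tail_cons] at himm hreg
      by_cases hc : c = '#'
      · subst hc
        obtain ⟨v, hv⟩ := Option.isSome_iff_exists.mp (himm rfl)
        simp [hv, pv_zero_bor, List.foldl, pv_L_imm, pv_F_imm_I, pv_F_imm_val, pv_shl]
      · by_cases hr : c = 'r'
        · subst hr
          obtain ⟨r, hrv⟩ := Option.isSome_iff_exists.mp (hreg hc rfl)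
          simp [hc, hrv, pv_zero_bor, List.foldl, pv_L_reg, pv_F_reg, pv_shl]
        · simp [hc, hr, pv_L_zero, pv_shl]
  · -- two tokens
    have hp2 := h2 (by simp)
    unfold pvP2 at hp2
    simp only [List.getD_cons_zero, List.getD_cons_succ] at hp2
    obtain ⟨hr0, hm0, hmem⟩ := hp2
    obtain ⟨Rm, hRm⟩ := Option.isSome_iff_exists.mp hr0
    norm_num [hRm]
    rcases hsp : PySem.Str.split₀ t1 with _ | ⟨m0, mrest⟩
    · rw [hsp] at hm0
    · rw [hsp] at hmem
      simp only [List.getD_cons_zero] at hmem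
      by_cases hLSL : m0 = "LSL"
      · subst hLSL
        obtain ⟨hlen2, hif⟩ := hmem (by simp)
        rcases mrest with _ | ⟨m1, tail⟩
        · simp at hlen2
        · simp only [List.getD_cons_succ, List.getD_cons_zero] at hif
          cases hm1 : m1.toList with
          | nil => simp [hm1, pv_S1]
          | cons hc hrest =>
            rw [hm1] at hif
            simp only [List.headD_cons, List.tail_cons] at hif
            by_cases hhc : hc = '#'
            · subst hhc
              rw [if_pos rfl] at hif
              obtain ⟨si, hsi⟩ := Option.isSome_iff_exists.mp hif
              simp [hsi, hm1, pv_S1, pv_zero_bor, List.foldl, pv_L_si, pv_F_si_val, pv_F_si_ty, pv_F_si_Rm, pv_shl]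
            · rw [if_neg (by simpa using hhc)] at hif
              obtain ⟨Rs, hRs⟩ := Option.isSome_iff_exists.mp hif
              simp [hhc, hRs, hm1, pv_S1, pv_zero_bor, List.foldl, pv_L_sr, pv_F_sr_Rs, pv_F_sr_ty, pv_F_sr_one, pv_F_sr_Rm, pv_shl]
      · by_cases hLSR : m0 = "LSR"
        · subst hLSR
          obtain ⟨hlen2, hif⟩ := hmem (by simp)
          rcases mrest with _ | ⟨m1, tail⟩
          · simp at hlen2
          · simp only [List.getD_cons_succ, List.getD_cons_zero] at hif
            cases hm1 : m1.toList with
            | nil => simp [hm1, pv_S2]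
            | cons hc hrest =>
              rw [hm1] at hif
              simp only [List.headD_cons, List.tail_cons] at hif
              by_cases hhc : hc = '#'
              · subst hhc
                rw [if_pos rfl] at hif
                obtain ⟨si, hsi⟩ := Option.isSome_iff_exists.mp hif
                simp [hsi, hm1, pv_S2, pv_zero_bor, pv_c6, List.foldl, pv_L_si, pv_F_si_val, pv_F_si_ty, pv_F_si_Rm, pv_shl]
              · rw [if_neg (by simpa using hhc)] at hif
                obtain ⟨Rs, hRs⟩ := Option.isSome_iff_exists.mp hif
                simp [hhc, hRs, hm1, pv_S2, pv_zero_bor, pv_c6, List.foldl, pv_L_sr, pv_F_sr_Rs, pv_F_sr_ty, pv_F_sr_one, pv_F_sr_Rm, pv_shl]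
        · by_cases hASR : m0 = "ASR"
          · subst hASR
            obtain ⟨hlen2, hif⟩ := hmem (by simp)
            rcases mrest with _ | ⟨m1, tail⟩
            · simp at hlen2
            · simp only [List.getD_cons_succ, List.getD_cons_zero] at hif
              cases hm1 : m1.toList with
              | nil => simp [hm1, pv_S3]
              | cons hc hrest =>
                rw [hm1] at hif
                simp only [List.headD_cons, List.tail_cons] at hif
                by_cases hhc : hc = '#'
                · subst hhc
                  rw [if_pos rfl] at hif
                  obtain ⟨si, hsi⟩ := Option.isSome_iff_exists.mp hif
                  simp [hsi, hm1, pv_S3, pv_zero_bor, pv_c3, List.foldl, pv_L_si, pv_F_si_val, pv_F_si_ty, pv_F_si_Rm, pv_shl]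
                · rw [if_neg (by simpa using hhc)] at hif
                  obtain ⟨Rs, hRs⟩ := Option.isSome_iff_exists.mp hif
                  simp [hhc, hRs, hm1, pv_S3, pv_zero_bor, pv_c3, List.foldl, pv_L_sr, pv_F_sr_Rs, pv_F_sr_ty, pv_F_sr_one, pv_F_sr_Rm, pv_shl]
          · by_cases hROR : m0 = "ROR"
            · subst hROR
              obtain ⟨hlen2, hif⟩ := hmem (by simp)
              rcases mrest with _ | ⟨m1, tail⟩
              · simp at hlen2
              · simp only [List.getD_cons_succ, List.getD_cons_zero] at hif
                cases hm1 : m1.toList with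
                | nil => simp [hm1, pv_S4]
                | cons hc hrest =>
                  rw [hm1] at hif
                  simp only [List.headD_cons, List.tail_cons] at hif
                  by_cases hhc : hc = '#'
                  · subst hhc
                    rw [if_pos rfl] at hif
                    obtain ⟨si, hsi⟩ := Option.isSome_iff_exists.mp hif
                    simp [hsi, hm1, pv_S4, pv_zero_bor, pv_c4, pv_c5, pv_c6, pv_bor_64_32, List.foldl, pv_L_si, pv_F_si_val, pv_F_si_ty, pv_F_si_Rm, pv_shl]
                  · rw [if_neg (by simpa using hhc)] at hif
                    obtain ⟨Rs, hRs⟩ := Option.isSome_iff_exists.mp hif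
                    simp [hhc, hRs, hm1, pv_S4, pv_zero_bor, pv_c4, pv_c5, pv_c6, pv_bor_64_32, List.foldl, pv_L_sr, pv_F_sr_Rs, pv_F_sr_ty, pv_F_sr_one, pv_F_sr_Rm, pv_shl]
            · by_cases hRRX : m0 = "RRX"
              · subst hRRX
                simp [pv_zero_bor, pv_c4, pv_c5, pv_c6, pv_c7, List.foldl, pv_L_rrx, pv_F_rrx_ty, pv_F_rrx_Rm, pv_shl]
              · have hS : SHIFT_TY.get? m0 = none := pv_S_none m0 hLSL hLSR hASR hROR
                simp [hLSL, hLSR, hASR, hROR, hRRX, hS, pv_L_zero, pv_shl]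
  · simp at hlen
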